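-- pv_equiv track=rewrite | github.com/SABAGHhamed/Lateral_Interpretation_GUI | seismic_gui/tsp.py | merge_ends_to_starts
-- ===== SOURCE A (Python) =====
-- def merge_ends_to_starts(lines):
--
--     merged_lines = []
--     visited = [False] * len(lines)
--
--     for i, line in enumerate(lines):
--         if visited[i]:
--             continue
--
--         # Start a new merged line
--         merged_line = line[:]
--         visited[i] = True
--
--         # Try to merge with other lines
--         while True:
--             merged = False
--             for j, other_line in enumerate(lines):
--                 if visited[j]:
--                     continue
--
--                 # Check for last point to first point connection
--                 if merged_line[-1] == other_line[0]:
--                     merged_line.extend(other_line[1:])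
--                     visited[j] = True
--                     merged = True
--                     break
--
--             if not merged:  # No more lines to merge
--                 break
--
--         # Add the merged line to the result
--         merged_lines.append(merged_line)
--
--     return merged_lines
-- ===== SOURCE B (Python) =====
-- def merge_ends_to_starts(lines):
--     # Index lines by their start point: start value -> queue of line indices (ascending).
--     index = {}
--     for j, line in enumerate(lines):
--         index.setdefault(line[0], []).append(j)
--
--     visited = [False] * len(lines)
--     merged_lines = []
--     for i, line in enumerate(lines):
--         if visited[i]:
--             continue
--         visited[i] = True
--         merged = line[:]
--         while True:
--             bucket = index.get(merged[-1])
--             # lazily discard already-consumed lines (each index is discarded at most once ever)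
--             while bucket and visited[bucket[0]]:
--                 bucket.pop(0)
--             if not bucket:
--                 break
--             j = bucket[0]
--             visited[j] = True
--             merged.extend(lines[j][1:])
--         merged_lines.append(merged)
--     return merged_lines
-- ===== Notes on version B (the rewrite author's own statement) =====
-- stated objective: faster
-- what changed: Replaces A's repeated full rescans of all lines after every merge with a dict built once from start-point to the ascending queue of line indices, so each chain extension is a single dict lookup with lazy amortized-O(1) discarding of consumed indices.
-- outside the precondition, e.g. on merge_ends_to_starts([[]]): A returns [[]], B raises IndexError
import Mathlib
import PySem

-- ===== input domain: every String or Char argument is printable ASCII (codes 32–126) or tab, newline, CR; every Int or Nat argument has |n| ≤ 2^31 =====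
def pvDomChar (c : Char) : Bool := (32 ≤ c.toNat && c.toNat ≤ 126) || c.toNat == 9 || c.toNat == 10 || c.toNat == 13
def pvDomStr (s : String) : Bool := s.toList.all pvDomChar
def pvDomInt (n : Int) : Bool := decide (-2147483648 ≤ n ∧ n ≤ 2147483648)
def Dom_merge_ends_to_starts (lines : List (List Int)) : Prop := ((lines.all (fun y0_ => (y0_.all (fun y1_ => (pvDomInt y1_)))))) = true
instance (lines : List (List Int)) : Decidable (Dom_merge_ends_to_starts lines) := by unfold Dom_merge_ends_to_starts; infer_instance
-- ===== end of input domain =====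

-- B replaces A's repeated full rescans of the line list with a start-point index (dict) built once,
-- with lazy discarding of consumed indices; equivalence of return values is proved on Pre_ below.

-- ===== PORT A =====
-- enumerate(lines) with Nat indices (list positions)
def pvEnum {α : Type} : Nat → List α → List (Nat × α)
  | _, [] => []
  | i, x :: xs => (i, x) :: pvEnum (i + 1) xs

-- 'merged_line[-1] == other_line[0]' (false where Python would raise; those inputs are outside Pre_)
def pvMatch (last? : Option Int) (other : List Int) : Bool :=
  match last?, other.head? with
  | some a, some b => a == b
  | _, _ => false

-- the inner 'for j, other_line in enumerate(lines)' scan of A's while-body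
def pvScanA (visited : List Bool) (last? : Option Int) : List (Nat × List Int) → Option (Nat × List Int)
  | [] => none
  | (j, other) :: rest =>
    if visited.getD j true then pvScanA visited last? rest
    else if pvMatch last? other then some (j, other)
    else pvScanA visited last? rest

-- A's 'while True' merge loop; fuel = len(lines) always suffices (each iteration marks one line visited)
def pvWhileA (lines : List (List Int)) : Nat → List Bool → List Int → List Int × List Bool
  | 0, visited, ml => (ml, visited)
  | fuel + 1, visited, ml =>
    match pvScanA visited ml.getLast? (pvEnum 0 lines) with
    | none => (ml, visited)
    | some (j, other) => pvWhileA lines fuel (visited.set j true) (ml ++ other.drop 1)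

-- A's outer 'for i, line in enumerate(lines)'
def pvOuterA (lines : List (List Int)) : List (Nat × List Int) → List Bool → List (List Int) → List (List Int)
  | [], _, acc => acc
  | (i, line) :: rest, visited, acc =>
    if visited.getD i true then pvOuterA lines rest visited acc
    else
      let r := pvWhileA lines lines.length (visited.set i true) line
      pvOuterA lines rest r.2 (acc ++ [r.1])

def merge_ends_to_starts (lines : List (List Int)) : List (List Int) :=
  pvOuterA lines (pvEnum 0 lines) (List.replicate lines.length false) []

-- ===== PORT B =====
-- 'index.setdefault(line[0], []).append(j)' over enumerate(lines) (empty lines are outside Pre_)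
def pvBuildIndex : List (Nat × List Int) → PySem.Dict Int (List Nat) → PySem.Dict Int (List Nat)
  | [], d => d
  | (j, line) :: rest, d =>
    match line.head? with
    | some v => pvBuildIndex rest (d.insert v (d.getD v [] ++ [j]))
    | none => pvBuildIndex rest d

-- 'while bucket and visited[bucket[0]]: bucket.pop(0)'
def pvPopVisited (visited : List Bool) : List Nat → List Nat
  | [] => []
  | j :: rest => if visited.getD j true then pvPopVisited visited rest else j :: rest

-- B's 'while True' chain loop; the dict is threaded because the pops mutate it
def pvWhileB (lines : List (List Int)) : Nat → PySem.Dict Int (List Nat) → List Bool → List Int →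
    List Int × List Bool × PySem.Dict Int (List Nat)
  | 0, d, visited, ml => (ml, visited, d)
  | fuel + 1, d, visited, ml =>
    match ml.getLast? with
    | none => (ml, visited, d)
    | some e =>
      let bucket := pvPopVisited visited (d.getD e [])
      let d' := d.insert e bucket
      match bucket with
      | [] => (ml, visited, d')
      | j :: _ => pvWhileB lines fuel d' (visited.set j true) (ml ++ (lines.getD j []).drop 1)

def pvOuterB (lines : List (List Int)) : List (Nat × List Int) → PySem.Dict Int (List Nat) → List Bool →
    List (List Int) → List (List Int)
  | [], _, _, acc => acc
  | (i, line) :: rest, d, visited, acc =>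
    if visited.getD i true then pvOuterB lines rest d visited acc
    else
      let r := pvWhileB lines lines.length d (visited.set i true) line
      pvOuterB lines rest r.2.2 r.2.1 (acc ++ [r.1])

def merge_ends_to_starts_alt (lines : List (List Int)) : List (List Int) :=
  pvOuterB lines (pvEnum 0 lines) (pvBuildIndex (pvEnum 0 lines) PySem.Dict.empty)
    (List.replicate lines.length false) []

-- ===== PRECONDITION & SPEC =====
-- Pre_ excludes inputs containing an empty polyline: the Python A raises IndexError on all of them
-- except the single degenerate input [[]] (where it returns [[]] while B raises IndexError building the index).
def Pre_merge_ends_to_starts (lines : List (List Int)) : Prop := ∀ l ∈ lines, l ≠ []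
instance (lines : List (List Int)) : Decidable (Pre_merge_ends_to_starts lines) := by
  unfold Pre_merge_ends_to_starts; infer_instance

def pvWitness_merge_ends_to_starts : List (List Int) := [[1, 2], [2, 3], [5], [3, 1]]

def Spec_merge_ends_to_starts (lines : List (List Int)) (out : List (List Int)) : Prop := out = merge_ends_to_starts_alt lines
instance (lines : List (List Int)) (out : List (List Int)) : Decidable (Spec_merge_ends_to_starts lines out) := by unfold Spec_merge_ends_to_starts; infer_instance

-- ===== CLAIM (what is proved, stated in full; the proofs are below) =====
def Claim_equal_merge_ends_to_starts : Prop := ∀ (lines : List (List Int)), Dom_merge_ends_to_starts lines → Pre_merge_ends_to_starts lines → Spec_merge_ends_to_starts lines (merge_ends_to_starts lines)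

-- ===== LEMMAS AND PROOFS =====

-- the pairs of enumerate(lines) whose line starts with e, in index order
def pvOrigP (lines : List (List Int)) (e : Int) : List (Nat × List Int) :=
  (pvEnum 0 lines).filter (fun p => p.2.head? == some e)

-- coupling invariant: each bucket of the dict is the map-fst of a suffix of pvOrigP,
-- and every pair dropped from the front is already visited
def pvBInv (lines : List (List Int)) (d : PySem.Dict Int (List Nat)) (visited : List Bool) : Prop :=
  ∀ e : Int, ∃ l1 l2, pvOrigP lines e = l1 ++ l2 ∧ d.getD e [] = l2.map Prod.fst ∧
    ∀ p ∈ l1, visited.getD p.1 true = true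

theorem pvBuildIndex_getD (l : List (Nat × List Int)) (d : PySem.Dict Int (List Nat)) (e : Int) :
    (pvBuildIndex l d).getD e [] = d.getD e [] ++ (l.filter (fun p => p.2.head? == some e)).map Prod.fst := by
  induction l generalizing d with
  | nil => simp [pvBuildIndex]
  | cons p rest ih =>
    obtain ⟨j, line⟩ := p
    match hh : line.head? with
    | none => simp [pvBuildIndex, hh, ih]
    | some v =>
      simp only [pvBuildIndex, hh, ih, List.filter_cons]
      by_cases hv : v = e
      · subst hv
        simp
      · simp [PySem.Dict.getD_insert, hv, Ne.symm hv]

theorem pvScanA_eq_find (visited : List Bool) (last? : Option Int) (l : List (Nat × List Int)) :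
    pvScanA visited last? l = l.find? (fun p => !(visited.getD p.1 true) && pvMatch last? p.2) := by
  induction l with
  | nil => rfl
  | cons p rest ih =>
    obtain ⟨j, other⟩ := p
    by_cases hv : visited[j]?.getD true = true
    · simp [pvScanA, List.find?, List.getD, hv, ih]
    · by_cases hm : pvMatch last? other
      · simp [pvScanA, List.find?, List.getD, hv, hm]
      · simp [pvScanA, List.find?, List.getD, hv, hm, ih]

theorem pvPopVisited_suffix (visited : List Bool) (l : List Nat) :
    ∃ l1, l = l1 ++ pvPopVisited visited l ∧ ∀ j ∈ l1, visited.getD j true = true := by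
  induction l with
  | nil => exact ⟨[], by simp [pvPopVisited]⟩
  | cons j rest ih =>
    by_cases hv : visited[j]?.getD true = true
    · obtain ⟨l1, h1, h2⟩ := ih
      refine ⟨j :: l1, ?_, ?_⟩
      · have hstep : pvPopVisited visited (j :: rest) = pvPopVisited visited rest := by
          simp [pvPopVisited, List.getD, hv]
        rw [hstep]; simpa using h1
      · intro x hx
        rcases List.mem_cons.mp hx with h | h
        · subst h; exact hv
        · exact h2 x h
    · refine ⟨[], ?_, by simp⟩
      simp [pvPopVisited, List.getD, hv]

theorem pvPopVisited_head (visited : List Bool) (l : List Nat) :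
    (pvPopVisited visited l).head? = l.find? (fun j => !(visited.getD j true)) := by
  induction l with
  | nil => rfl
  | cons j rest ih =>
    by_cases hv : visited[j]?.getD true = true
    · simp [pvPopVisited, List.getD, hv, List.find?, ih]
    · simp [pvPopVisited, List.getD, hv, List.find?]

theorem pvEnum_mem {α : Type} (s : Nat) (l : List α) (p : Nat × α) (h : p ∈ pvEnum s l) :
    ∃ k, p.1 = s + k ∧ l[k]? = some p.2 := by
  induction l generalizing s with
  | nil => simp [pvEnum] at h
  | cons x xs ih =>
    simp only [pvEnum, List.mem_cons] at h
    rcases h with h | h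
    · exact ⟨0, by simp [h]⟩
    · obtain ⟨k, hk1, hk2⟩ := ih (s + 1) h
      exact ⟨k + 1, by omega, by simpa using hk2⟩

theorem pvMatch_some (e : Int) (l : List Int) : pvMatch (some e) l = (l.head? == some e) := by
  match h : l.head? with
  | none => simp [pvMatch, h]
  | some b => simp [pvMatch, h, eq_comm]

theorem pvGetD_set_true (visited : List Bool) (i j : Nat) (h : visited.getD j true = true) :
    (visited.set i true).getD j true = true := by
  simp only [List.getD, List.getElem?_set]
  by_cases hij : i = j
  · subst hij
    by_cases hlt : i < visited.length <;> simp [hlt]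
  · simpa [hij] using h

theorem pvBInv_mono (lines : List (List Int)) (d : PySem.Dict Int (List Nat)) (visited : List Bool)
    (i : Nat) (h : pvBInv lines d visited) : pvBInv lines d (visited.set i true) := by
  intro e
  obtain ⟨l1, l2, h1, h2, h3⟩ := h e
  exact ⟨l1, l2, h1, h2, fun p hp => pvGetD_set_true _ _ _ (h3 p hp)⟩

theorem pv_find?_filter {α : Type} (l : List α) (p q : α → Bool) :
    (l.filter p).find? q = l.find? (fun a => p a && q a) := by
  induction l with
  | nil => rfl
  | cons x xs ih =>
    by_cases hp : p x
    · by_cases hq : q x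
      · simp [hp, hq, List.find?]
      · simp [hp, hq, List.find?, ih]
    · simp [hp, List.find?, ih]

theorem pv_find?_append_of_prefix {α : Type} (l1 l2 : List α) (q : α → Bool)
    (h : ∀ a ∈ l1, q a = false) : (l1 ++ l2).find? q = l2.find? q := by
  induction l1 with
  | nil => rfl
  | cons x xs ih =>
    have hx : q x = false := h x (by simp)
    simp only [List.cons_append, List.find?, hx]
    exact ih (fun a ha => h a (by simp [ha]))

theorem pv_find?_map {α β : Type} (l : List α) (f : α → β) (q : β → Bool) :
    (l.map f).find? q = (l.find? (fun a => q (f a))).map f := by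
  induction l with
  | nil => rfl
  | cons x xs ih =>
    by_cases hq : q (f x)
    · simp [List.find?, hq]
    · simp [List.find?, hq, ih]

-- A's scan, at last point e, finds exactly the first unvisited pair of pvOrigP
theorem pvScanA_origP (lines : List (List Int)) (visited : List Bool) (e : Int) :
    pvScanA visited (some e) (pvEnum 0 lines) =
      (pvOrigP lines e).find? (fun p => !(visited.getD p.1 true)) := by
  rw [pvScanA_eq_find, pvOrigP, pv_find?_filter]
  congr 1
  funext a
  rw [pvMatch_some, Bool.and_comm]

theorem pvWhile_eq (lines : List (List Int)) (fuel : Nat) :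
    ∀ (d : PySem.Dict Int (List Nat)) (visited : List Bool) (ml : List Int), pvBInv lines d visited →
      pvWhileA lines fuel visited ml = ((pvWhileB lines fuel d visited ml).1, (pvWhileB lines fuel d visited ml).2.1) ∧
      pvBInv lines (pvWhileB lines fuel d visited ml).2.2 (pvWhileB lines fuel d visited ml).2.1 := by
  induction fuel with
  | zero => exact fun d visited ml h => ⟨rfl, h⟩
  | succ fuel ih =>
    intro d visited ml h
    cases hml : ml.getLast? with
    | none =>
      have hscan : pvScanA visited (none : Option Int) (pvEnum 0 lines) = none := by
        rw [pvScanA_eq_find]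
        apply List.find?_eq_none.mpr
        intro p _
        cases p.2.head? <;> simp [pvMatch]
      have hA : pvWhileA lines (fuel + 1) visited ml = (ml, visited) := by
        simp only [pvWhileA]; rw [hml, hscan]
      have hB : pvWhileB lines (fuel + 1) d visited ml = (ml, visited, d) := by
        simp only [pvWhileB]; rw [hml]
      rw [hA, hB]
      exact ⟨rfl, h⟩
    | some e =>
      obtain ⟨l1, l2, h1, h2, h3⟩ := h e
      have hA : pvScanA visited (some e) (pvEnum 0 lines) =
          l2.find? (fun p => !(visited.getD p.1 true)) := by
        rw [pvScanA_origP, h1, pv_find?_append_of_prefix]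
        intro p hp
        rw [h3 p hp]
        rfl
      have hhead : (pvPopVisited visited (d.getD e [])).head? =
          (l2.find? (fun p => !(visited.getD p.1 true))).map Prod.fst := by
        rw [h2, pvPopVisited_head, pv_find?_map]
      cases hf : l2.find? (fun p => !(visited.getD p.1 true)) with
      | none =>
        have hbucket : pvPopVisited visited (d.getD e []) = [] := by
          rw [← List.head?_eq_none_iff, hhead, hf]; rfl
        have hAstep : pvWhileA lines (fuel + 1) visited ml = (ml, visited) := by
          simp only [pvWhileA]; rw [hml, hA, hf]
        have hBstep : pvWhileB lines (fuel + 1) d visited ml = (ml, visited, d.insert e []) := by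
          simp only [pvWhileB]; rw [hml]; simp only [hbucket]
        rw [hAstep, hBstep]
        refine ⟨rfl, ?_⟩
        intro e'
        by_cases he : e' = e
        · subst he
          refine ⟨l1 ++ l2, [], by simp [h1], by simp, ?_⟩
          intro p hp
          rcases List.mem_append.mp hp with hp | hp
          · exact h3 p hp
          · have := List.find?_eq_none.mp hf p hp
            simpa using this
        · obtain ⟨m1, m2, hm1, hm2, hm3⟩ := h e'
          exact ⟨m1, m2, hm1, by rw [PySem.Dict.getD_insert, if_neg he]; exact hm2, hm3⟩
      | some p0 =>
        have hmem2 : p0 ∈ l2 := List.mem_of_find?_eq_some hf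
        have hbhead : (pvPopVisited visited (d.getD e [])).head? = some p0.1 := by
          rw [hhead, hf]; rfl
        obtain ⟨t, hbucket⟩ : ∃ t, pvPopVisited visited (d.getD e []) = p0.1 :: t := by
          cases hb : pvPopVisited visited (d.getD e []) with
          | nil => rw [hb] at hbhead; simp at hbhead
          | cons j t =>
            rw [hb] at hbhead
            simp only [List.head?_cons, Option.some.injEq] at hbhead
            exact ⟨t, by rw [hbhead]⟩
        have hline : lines.getD p0.1 [] = p0.2 := by
          have hmemE : p0 ∈ pvEnum 0 lines := by
            have : p0 ∈ pvOrigP lines e := by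
              rw [h1]; exact List.mem_append.mpr (Or.inr hmem2)
            exact List.mem_of_mem_filter this
          obtain ⟨k, hk1, hk2⟩ := pvEnum_mem 0 lines p0 hmemE
          simp only [List.getD, hk1, Nat.zero_add, hk2, Option.getD_some]
        have hAstep : pvWhileA lines (fuel + 1) visited ml =
            pvWhileA lines fuel (visited.set p0.1 true) (ml ++ p0.2.drop 1) := by
          simp only [pvWhileA]; rw [hml, hA, hf]
        have hBstep : pvWhileB lines (fuel + 1) d visited ml =
            pvWhileB lines fuel (d.insert e (p0.1 :: t)) (visited.set p0.1 true)
              (ml ++ (lines.getD p0.1 []).drop 1) := by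
          simp only [pvWhileB]; rw [hml]; simp only [hbucket]
        have hinv' : pvBInv lines (d.insert e (p0.1 :: t)) visited := by
          intro e'
          by_cases he : e' = e
          · subst he
            obtain ⟨m1, hsuf, hm1vis⟩ := pvPopVisited_suffix visited (d.getD e' [])
            rw [h2] at hsuf hbucket
            obtain ⟨l2a, l2b, hsplit, hma, hmb⟩ := List.map_eq_append_iff.mp hsuf
            refine ⟨l1 ++ l2a, l2b, ?_, ?_, ?_⟩
            · rw [h1, hsplit, List.append_assoc]
            · rw [PySem.Dict.getD_insert, if_pos rfl, ← hbucket, hmb]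
            · intro p hp
              rcases List.mem_append.mp hp with hp | hp
              · exact h3 p hp
              · apply hm1vis
                rw [← hma]
                exact List.mem_map_of_mem hp
          · obtain ⟨m1, m2, hm1, hm2, hm3⟩ := h e'
            exact ⟨m1, m2, hm1, by rw [PySem.Dict.getD_insert, if_neg he]; exact hm2, hm3⟩
        rw [hAstep, hBstep, hline]
        exact ih (d.insert e (p0.1 :: t)) (visited.set p0.1 true) (ml ++ p0.2.drop 1)
          (pvBInv_mono lines _ visited p0.1 hinv')

theorem pvOuter_eq (lines : List (List Int)) (rest : List (Nat × List Int)) :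
    ∀ (d : PySem.Dict Int (List Nat)) (visited : List Bool) (acc : List (List Int)), pvBInv lines d visited →
      pvOuterA lines rest visited acc = pvOuterB lines rest d visited acc := by
  induction rest with
  | nil => intro d visited acc _; rfl
  | cons p rest ih =>
    intro d visited acc h
    obtain ⟨i, line⟩ := p
    by_cases hv : visited.getD i true = true
    · simp only [pvOuterA, pvOuterB, if_pos hv]
      exact ih d visited acc h
    · simp only [pvOuterA, pvOuterB, if_neg hv]
      obtain ⟨heq, hinv⟩ := pvWhile_eq lines lines.length d (visited.set i true) line
        (pvBInv_mono lines d visited i h)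
      simp only [heq]
      exact ih _ _ _ hinv

theorem pvBInv_init (lines : List (List Int)) :
    pvBInv lines (pvBuildIndex (pvEnum 0 lines) PySem.Dict.empty) (List.replicate lines.length false) := by
  intro e
  refine ⟨[], pvOrigP lines e, by simp, ?_, by simp⟩
  rw [pvBuildIndex_getD]
  simp [pvOrigP, PySem.Dict.getD, PySem.Dict.empty, PySem.Dict.get?]

-- ===== VERDICT (by name: the statement is the Claim_ definition above) =====
theorem merge_ends_to_starts_spec : Claim_equal_merge_ends_to_starts := by
  intro lines _ _
  unfold Spec_merge_ends_to_starts merge_ends_to_starts merge_ends_to_starts_alt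
  exact pvOuter_eq lines (pvEnum 0 lines) _ _ [] (pvBInv_init lines)
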